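-- pv_equiv track=rewrite | github.com/alanchrissantony/workouts | workouts.py | transform_list_by_chunks
-- ===== SOURCE A (Python) =====
-- def transform_list_by_chunks(arr: list) -> list:
--     """
--     Transforms the list 'arr' by taking chunks (whose size depends on a changing parameter k)
--     and reverses the chunk if its length is even, otherwise leaves it as is.
--
--     The update of the start index uses the rule i = k*k - i and increments k by 1 each iteration.
--     (This is one interpretation of the snippet.)
--     """
--     nums = []
--     i = 0
--     k = 1
--     n = len(arr)
--     while i < n:
--         # Determine chunk size as k; slice from i to i+k.
--         chunk = arr[i:i+k]
--         if len(chunk) % 2 == 0: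
--             nums.extend(chunk[::-1])
--         else:
--             nums.extend(chunk)
--         # Update i as shown in snippet: i = k*k - i.
--         i = k * k - i
--         k += 1
--     return nums
-- ===== SOURCE B (Python) =====
-- def transform_list_by_chunks(arr: list) -> list:
--     """Recursive head-first decomposition: consume growing chunks (size k = 1,2,3,...),
--     reversing a chunk when its length is even, with no index arithmetic."""
--     def go(rest, k):
--         if not rest:
--             return []
--         chunk = rest[:k]
--         head = chunk[::-1] if len(chunk) % 2 == 0 else chunk
--         return head + go(rest[k:], k + 1)
--     return go(arr, 1)
-- ===== Notes on version B (the rewrite author's own statement) =====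
-- stated objective: simpler
-- what changed: Replaces the while loop with index state (i, k, i = k*k - i) by a recursion that consumes the list head-first in growing chunks (take k / drop k), eliminating all index arithmetic.
import Mathlib
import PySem

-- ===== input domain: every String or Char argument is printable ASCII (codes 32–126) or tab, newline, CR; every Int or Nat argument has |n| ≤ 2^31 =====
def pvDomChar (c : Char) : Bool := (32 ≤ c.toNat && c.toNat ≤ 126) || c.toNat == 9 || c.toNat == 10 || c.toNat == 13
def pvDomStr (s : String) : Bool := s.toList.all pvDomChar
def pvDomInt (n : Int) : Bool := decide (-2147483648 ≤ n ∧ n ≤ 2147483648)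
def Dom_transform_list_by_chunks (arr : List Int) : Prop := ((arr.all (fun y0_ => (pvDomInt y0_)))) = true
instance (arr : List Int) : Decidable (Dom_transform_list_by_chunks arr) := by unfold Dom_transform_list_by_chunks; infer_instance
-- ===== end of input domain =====

-- B replaces A's index-arithmetic while loop (i = k*k - i) by a head-first recursion
-- over growing chunks (take k / drop k); same values, simpler decomposition.


-- ===== PORT A =====
-- the while loop of A; state (nums, i, k); the two proof arguments record the loop
-- invariant (k ≥ 1, 2*i = k*(k-1)) needed only for termination, not to compute
def pvLoopA (arr nums : List Int) (i k : Int) (hk : 1 ≤ k) (hi : 2 * i = k * (k - 1)) :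
    List Int :=
  if h : i < (arr.length : Int) then
    -- chunk = arr[i:i+k]
    let chunk := PySem.List.slice arr (some i) (some (i + k))
    -- nums.extend(chunk[::-1]) / nums.extend(chunk)
    let nums' := if chunk.length % 2 == 0
      then nums ++ ((PySem.List.slice? chunk none none (-1)).getD [])
      else nums ++ chunk
    pvLoopA arr nums' (k * k - i) (k + 1) (by omega)
      (by have : k * (k - 1) = k * k - k := by ring
          have : (k + 1) * ((k + 1) - 1) = k * k + k := by ring
          omega)
  else nums
termination_by (↑arr.length - i).toNat
decreasing_by
  have hkk : k * (k - 1) = k * k - k := by ring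
  omega

def transform_list_by_chunks (arr : List Int) : List Int :=
  pvLoopA arr [] 0 1 (by omega) (by ring)

-- ===== PORT B =====
-- B's helper go(rest, k); the proof argument records k ≥ 1 (termination only)
def pvGoB (rest : List Int) (k : Int) (hk : 1 ≤ k) : List Int :=
  if h : rest = [] then []
  else
    let chunk := PySem.List.slice rest none (some k)      -- rest[:k]
    let head := if chunk.length % 2 == 0
      then ((PySem.List.slice? chunk none none (-1)).getD [])  -- chunk[::-1]
      else chunk
    head ++ pvGoB (PySem.List.slice rest (some k) none) (k + 1) (by omega)  -- rest[k:]
termination_by rest.length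
decreasing_by
  have h1 : PySem.List.slice rest (some k) none = rest.drop k.toNat :=
    PySem.List.slice_from rest (by omega)
  have h2 : rest.length ≠ 0 := fun hl => h (List.eq_nil_of_length_eq_zero hl)
  rw [h1]
  simp only [List.length_drop]
  omega

def transform_list_by_chunks_alt (arr : List Int) : List Int :=
  pvGoB arr 1 (by omega)

-- ===== PRECONDITION & SPEC =====
def Spec_transform_list_by_chunks (arr : List Int) (out : List Int) : Prop := out = transform_list_by_chunks_alt arr
instance (arr : List Int) (out : List Int) : Decidable (Spec_transform_list_by_chunks arr out) := by unfold Spec_transform_list_by_chunks; infer_instance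

-- ===== CLAIM (what is proved, stated in full; the proofs are below) =====
def Claim_equal_transform_list_by_chunks : Prop := ∀ (arr : List Int), Dom_transform_list_by_chunks arr → Spec_transform_list_by_chunks arr (transform_list_by_chunks arr)

-- ===== LEMMAS AND PROOFS =====

-- Main invariant: A's loop from state (nums, i, k) produces nums ++ B's recursion on the
-- remaining suffix arr.drop i.toNat with the same k.
theorem pvLoopA_eq_goB (N : Nat) :
    ∀ (arr nums : List Int) (i k : Int) (hk : 1 ≤ k) (hi : 2 * i = k * (k - 1)),
      0 ≤ i → (↑arr.length - i).toNat ≤ N →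
      pvLoopA arr nums i k hk hi = nums ++ pvGoB (arr.drop i.toNat) k hk := by
  induction N with
  | zero =>
    intro arr nums i k hk hi h0 hN
    have hge : (↑arr.length : Int) ≤ i := by omega
    rw [pvLoopA, pvGoB]
    have hdrop : arr.drop i.toNat = [] := by
      apply List.drop_eq_nil_of_le; omega
    rw [dif_neg (by omega), dif_pos hdrop, List.append_nil]
  | succ N ih =>
    intro arr nums i k hk hi h0 hN
    by_cases hlt : i < (↑arr.length : Int)
    · rw [pvLoopA, dif_pos hlt]
      have hchunk : PySem.List.slice arr (some i) (some (i + k)) =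
          (arr.drop i.toNat).take k.toNat := by
        rw [PySem.List.slice_toNat arr h0 (by omega)]
        congr 1; omega
      have hdropne : arr.drop i.toNat ≠ [] := by
        intro hnil
        have := List.drop_eq_nil_iff.mp hnil
        omega
      conv_rhs => rw [pvGoB]
      rw [dif_neg hdropne]
      have hchunkB : PySem.List.slice (arr.drop i.toNat) none (some k) =
          (arr.drop i.toNat).take k.toNat := PySem.List.slice_to _ (by omega)
      have hrest : PySem.List.slice (arr.drop i.toNat) (some k) none =
          arr.drop (k * k - i).toNat := by
        rw [PySem.List.slice_from _ (by omega), List.drop_drop]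
        congr 1
        have hkk : k * (k - 1) = k * k - k := by ring
        omega
      have hkk : k * (k - 1) = k * k - k := by ring
      have hmeas : (↑arr.length - (k * k - i)).toNat ≤ N := by omega
      have hkk2 : (k + 1) * ((k + 1) - 1) = k * k + k := by ring
      rw [ih arr _ (k * k - i) (k + 1) (by omega) (by omega) (by omega) hmeas]
      rw [hchunk, hchunkB, hrest]
      simp only [PySem.List.slice?_none_none_neg_one, Option.getD_some]
      split_ifs <;> simp [List.append_assoc]
    · rw [pvLoopA, dif_neg hlt, pvGoB]
      have hdrop : arr.drop i.toNat = [] := by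
        apply List.drop_eq_nil_of_le; omega
      rw [dif_pos hdrop, List.append_nil]

-- ===== VERDICT (by name: the statement is the Claim_ definition above) =====
theorem transform_list_by_chunks_spec : Claim_equal_transform_list_by_chunks := by
  intro arr _
  unfold Spec_transform_list_by_chunks transform_list_by_chunks transform_list_by_chunks_alt
  rw [pvLoopA_eq_goB arr.length arr [] 0 1 (by omega) (by ring) (by omega) (by omega)]
  simp
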